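-- pv_equiv track=rewrite | github.com/tpeaton/kmeans-news | kmeans-news.py | generate_vectors
-- ===== SOURCE A (Python) =====
-- def _generate_vector_structure(histograms):
--     """Generate sorted vector of all unique words"""
--     words = set()
--     for source, histogram in histograms.items():
--         for word in histogram.keys():
--             words.add(word)
--
--     words = sorted(list(words))
--     return words
--
-- def generate_vectors(histograms):
--     """Convert histograms to vectors"""
--     words = _generate_vector_structure(histograms)
--
--     for source, histogram in histograms.items():
--         vector = [0 for x in range(len(words))]
--
--         for word, count in histogram.items():
--             index = words.index(word)
--             vector[index] = count
--         histograms[source] = vector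
--
--     return histograms
-- ===== SOURCE B (Python) =====
-- def _generate_vector_structure(histograms):
--     """Generate sorted vector of all unique words"""
--     words = set()
--     for source, histogram in histograms.items():
--         for word in histogram.keys():
--             words.add(word)
--
--     words = sorted(list(words))
--     return words
--
-- def generate_vectors(histograms):
--     """Convert histograms to vectors (gather over the vocabulary)"""
--     words = _generate_vector_structure(histograms)
--
--     for source, histogram in list(histograms.items()):
--         histograms[source] = [histogram.get(word, 0) for word in words]
--
--     return histograms
-- ===== Notes on version B (the rewrite author's own statement) =====
-- stated objective: simpler
-- what changed: The per-source scatter loop (zero-vector preallocation, words.index lookup, positional assignment) is replaced by a gather: one comprehension over the sorted vocabulary reading each count with histogram.get(word, 0); Pre_ only excludes association lists with duplicate source keys or duplicate word keys inside a histogram, which do not represent a Python dict.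
import Mathlib
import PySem

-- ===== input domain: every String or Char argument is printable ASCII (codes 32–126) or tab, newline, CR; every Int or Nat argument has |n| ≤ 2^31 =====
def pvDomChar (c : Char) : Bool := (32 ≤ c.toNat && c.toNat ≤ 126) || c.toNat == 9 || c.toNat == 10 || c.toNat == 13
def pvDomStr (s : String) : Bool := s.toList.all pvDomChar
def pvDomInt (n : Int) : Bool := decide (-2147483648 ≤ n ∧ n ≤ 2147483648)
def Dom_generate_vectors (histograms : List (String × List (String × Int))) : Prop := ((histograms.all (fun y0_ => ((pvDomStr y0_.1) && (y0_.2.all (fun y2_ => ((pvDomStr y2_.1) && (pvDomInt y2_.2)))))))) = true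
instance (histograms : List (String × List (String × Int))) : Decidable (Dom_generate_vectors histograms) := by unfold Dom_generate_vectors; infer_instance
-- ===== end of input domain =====

-- B replaces A's per-source scatter (zero vector + words.index + positional write) by a gather over
-- the sorted vocabulary with histogram.get(word, 0); objective: simpler. Python A and B mutate the
-- input dict in place (the claim here is about the returned value, which is that same object).

-- ===== PORT A =====
-- _generate_vector_structure: union of all histogram keys as a Python set, then sorted(list(words))
def pvVocab (histograms : List (String × List (String × Int))) : List String :=
  let words : PySem.Set String :=
    histograms.foldl (fun ws sh => sh.2.foldl (fun ws wc => PySem.Set.add ws wc.1) ws) PySem.Set.empty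
  PySem.List.sorted words (fun x => x) false

def generate_vectors (histograms : List (String × List (String × Int))) : List (String × List Int) :=
  let words := pvVocab histograms
  histograms.map (fun sh =>
    let vector : List Int := (PySem.List.pyRange 0 (PySem.List.len words) 1).map (fun _ => 0)
    (sh.1, sh.2.foldl (fun v wc =>
      match PySem.List.index? words wc.1 with
      | some i => PySem.List.pySetD v (i : Int) wc.2
      | none => v   -- unreachable: every histogram word is in the vocabulary (Python would raise ValueError)
      ) vector))

-- ===== PORT B =====
def generate_vectors_alt (histograms : List (String × List (String × Int))) : List (String × List Int) :=
  let words := pvVocab histograms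
  histograms.map (fun sh =>
    (sh.1, words.map (fun w => PySem.Dict.getD (PySem.Dict.mk sh.2) w 0)))

-- ===== PRECONDITION & SPEC =====
-- Pre_ excludes association lists with duplicate source keys, or duplicate word keys within one
-- histogram: those do not represent any Python dict (the dict literal collapses duplicates), so
-- A's argument never takes that shape.
def Pre_generate_vectors (histograms : List (String × List (String × Int))) : Prop :=
  (histograms.map Prod.fst).Nodup ∧ ∀ sh ∈ histograms, (sh.2.map Prod.fst).Nodup
instance (histograms : List (String × List (String × Int))) : Decidable (Pre_generate_vectors histograms) := by unfold Pre_generate_vectors; infer_instance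
def pvWitness_generate_vectors : (List (String × List (String × Int))) :=
  [("s1", [("x", 1), ("y", 2)]), ("s2", [("y", 3), ("z", -1)])]

def Spec_generate_vectors (histograms : List (String × List (String × Int))) (out : List (String × List Int)) : Prop := out = generate_vectors_alt histograms
instance (histograms : List (String × List (String × Int))) (out : List (String × List Int)) : Decidable (Spec_generate_vectors histograms out) := by unfold Spec_generate_vectors; infer_instance

-- ===== CLAIM (what is proved, stated in full; the proofs are below) =====
def Claim_equal_generate_vectors : Prop := ∀ (histograms : List (String × List (String × Int))), Dom_generate_vectors histograms → Pre_generate_vectors histograms → Spec_generate_vectors histograms (generate_vectors histograms)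

-- ===== LEMMAS AND PROOFS =====

-- The vocabulary-accumulating fold: its result is duplicate-free and contains exactly the
-- histogram words (plus whatever was already in the accumulator set).
theorem pvVocabFold_spec (hs : List (String × List (String × Int))) :
    ∀ (s : PySem.Set String), s.Nodup →
      (hs.foldl (fun ws sh => sh.2.foldl (fun ws wc => PySem.Set.add ws wc.1) ws) s).Nodup ∧
      ∀ y, y ∈ hs.foldl (fun ws sh => sh.2.foldl (fun ws wc => PySem.Set.add ws wc.1) ws) s ↔
        (y ∈ s ∨ ∃ sh ∈ hs, ∃ wc ∈ sh.2, y = wc.1) := by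
  induction hs with
  | nil => intro s hsnd; simpa using hsnd
  | cons sh t ih =>
    intro s hsnd
    simp only [List.foldl_cons]
    rw [← PySem.Set.update_map_eq_foldl_add (f := Prod.fst)]
    obtain ⟨hnd, hmem⟩ := ih _ (PySem.Set.nodup_update _ _ hsnd)
    refine ⟨hnd, fun y => ?_⟩
    rw [hmem y, PySem.Set.mem_update]
    simp only [List.mem_map, List.mem_cons]
    constructor
    · rintro ((hy | ⟨wc, hwc, rfl⟩) | ⟨sh', h1, h2⟩)
      · exact Or.inl hy
      · exact Or.inr ⟨sh, Or.inl rfl, wc, hwc, rfl⟩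
      · exact Or.inr ⟨sh', Or.inr h1, h2⟩
    · rintro (hy | ⟨sh', (rfl | h1), wc, hwc, rfl⟩)
      · exact Or.inl (Or.inl hy)
      · exact Or.inl (Or.inr ⟨wc, hwc, rfl⟩)
      · exact Or.inr ⟨sh', h1, wc, hwc, rfl⟩

theorem pvVocab_nodup (hs : List (String × List (String × Int))) : (pvVocab hs).Nodup := by
  unfold pvVocab
  exact (PySem.List.sorted_perm _ _ _).nodup_iff.mpr (pvVocabFold_spec hs [] List.nodup_nil).1

theorem pvVocab_mem (hs : List (String × List (String × Int))) {sh} (hsh : sh ∈ hs)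
    {wc} (hwc : wc ∈ sh.2) : wc.1 ∈ pvVocab hs := by
  unfold pvVocab
  rw [PySem.List.mem_sorted]
  exact ((pvVocabFold_spec hs [] List.nodup_nil).2 wc.1).mpr (Or.inr ⟨sh, hsh, wc, hwc, rfl⟩)

-- The scatter loop preserves length.
theorem pvScatter_len (words : List String) :
    ∀ (hist : List (String × Int)) (v : List Int),
      (hist.foldl (fun v wc =>
        match PySem.List.index? words wc.1 with
        | some i => PySem.List.pySetD v (i : Int) wc.2
        | none => v) v).length = v.length := by
  intro hist
  induction hist with
  | nil => intro v; rfl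
  | cons wc rest ih =>
    intro v
    rw [List.foldl_cons]
    cases h : PySem.List.index? words wc.1 with
    | none => exact ih v
    | some i =>
      show (List.foldl (fun v wc =>
        match PySem.List.index? words wc.1 with
        | some i => PySem.List.pySetD v (i : Int) wc.2
        | none => v) (PySem.List.pySetD v (i : Int) wc.2) rest).length = v.length
      rw [PySem.List.pySetD_natCast, ih, List.length_set]

-- The scatter loop, pointwise: position j of the fold holds the histogram's (first-match) value at
-- words[j], defaulting to the initial vector's entry.
theorem pvScatter_getElem (words : List String) (hw : words.Nodup) :
    ∀ (hist : List (String × Int)) (v : List Int),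
      (hist.map Prod.fst).Nodup → (∀ wc ∈ hist, wc.1 ∈ words) →
      ∀ j (hj : j < v.length) (hjw : j < words.length),
        (hist.foldl (fun v wc =>
          match PySem.List.index? words wc.1 with
          | some i => PySem.List.pySetD v (i : Int) wc.2
          | none => v) v)[j]? = some (PySem.Dict.getD (PySem.Dict.mk hist) (words[j]'hjw) (v[j]'hj)) := by
  intro hist
  induction hist with
  | nil =>
    intro v _ _ j hj hjw
    rw [List.foldl_nil, List.getElem?_eq_getElem hj]
    have hc : (PySem.Dict.mk ([] : List (String × Int))).contains (words[j]'hjw) = false := by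
      rw [PySem.Dict.contains_mk]; rfl
    rw [PySem.Dict.getD_of_not_contains _ _ hc]
  | cons wc rest ih =>
    obtain ⟨w, c⟩ := wc
    intro v hnd hsub j hj hjw
    have hwmem : w ∈ words := hsub (w, c) List.mem_cons_self
    have hrest : ∀ p ∈ rest, p.1 ∈ words := fun p hp => hsub p (List.mem_cons_of_mem _ hp)
    rw [List.map_cons] at hnd
    have hwnotin : w ∉ rest.map Prod.fst := (List.nodup_cons.mp hnd).1
    have hndr : (rest.map Prod.fst).Nodup := (List.nodup_cons.mp hnd).2
    rw [List.foldl_cons]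
    cases hidx : PySem.List.index? words (w, c).1 with
    | none => exact absurd ((PySem.List.index?_eq_none_iff words w).mp hidx) (not_not_intro hwmem)
    | some i =>
      obtain ⟨hik, hival, _⟩ := PySem.List.getElem_of_index?_eq_some hidx
      show (List.foldl (fun v wc =>
          match PySem.List.index? words wc.1 with
          | some i => PySem.List.pySetD v (i : Int) wc.2
          | none => v) (PySem.List.pySetD v (i : Int) c) rest)[j]? =
        some (PySem.Dict.getD (PySem.Dict.mk ((w, c) :: rest)) (words[j]'hjw) (v[j]'hj))
      rw [PySem.List.pySetD_natCast]
      have hj' : j < (v.set i c).length := by rw [List.length_set]; exact hj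
      rw [ih (v.set i c) hndr hrest j hj' hjw]
      rw [PySem.Dict.getD_eq_get?_getD, PySem.Dict.getD_eq_get?_getD, PySem.Dict.get?_mk_cons]
      by_cases h : w = words[j]'hjw
      · have hij : i = j := hw.getElem_inj_iff.mp (by rw [hival, h])
        subst hij
        have hnc : (PySem.Dict.mk rest).get? (words[i]'hjw) = none := by
          rw [PySem.Dict.get?_eq_none_iff_not_mem_keys]
          simpa [PySem.Dict.keys, ← h] using hwnotin
        simp [h, hnc, List.getElem_set_self (by simpa using hj)]
      · have hij : i ≠ j := by intro he; subst he; exact h hival.symm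
        rw [List.getElem_set_ne hij]
        have hne : (w == words[j]'hjw) = false := beq_eq_false_iff_ne.mpr h
        simp [hne]

-- ===== VERDICT (by name: the statement is the Claim_ definition above) =====
theorem generate_vectors_spec : Claim_equal_generate_vectors := by
  intro hs _ hpre
  unfold Spec_generate_vectors generate_vectors generate_vectors_alt
  dsimp only
  apply List.map_congr_left
  intro sh hsh
  obtain ⟨hnds, hndh⟩ := hpre
  have hndsh : (sh.2.map Prod.fst).Nodup := hndh sh hsh
  have hw := pvVocab_nodup hs
  have hsub : ∀ wc ∈ sh.2, wc.1 ∈ pvVocab hs := fun wc hwc => pvVocab_mem hs hsh hwc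
  refine Prod.ext rfl ?_
  have hlenv : ((PySem.List.pyRange 0 (PySem.List.len (pvVocab hs)) 1).map (fun _ => (0 : Int))).length
      = (pvVocab hs).length := by
    rw [PySem.List.len_eq, PySem.List.pyRange_zero_natCast]; simp
  apply List.ext_getElem?
  intro j
  by_cases hjw : j < (pvVocab hs).length
  · have hj : j < ((PySem.List.pyRange 0 (PySem.List.len (pvVocab hs)) 1).map (fun _ => (0 : Int))).length :=
      hlenv ▸ hjw
    rw [pvScatter_getElem (pvVocab hs) hw sh.2 _ hndsh hsub j hj hjw]
    rw [List.getElem?_eq_getElem (by simpa using hjw)]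
    simp [List.getElem_map]
  · rw [List.getElem?_eq_none, List.getElem?_eq_none]
    · simpa using hjw
    · rw [pvScatter_len]; omega
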